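-- pv_equiv track=rewrite | github.com/neptuneZHU/DESexample | make_clusters.py | make_buffer
-- ===== SOURCE A (Python) =====
-- def make_buffer(index):
--   string = "[weighted-automaton]\n"
--   string += "states = 1, 2, 3, 4\n"
--   functions = ["-pick-", "-drop-"]
--   robots = ["R" + str(index), "R" + str(index + 1)]
--   eventlist = {}
--   buf = "B" + str(index)
--   alphabet = ""
--   first = True
--   robot = "R" + str(index)
--   for func in functions:
--     eventlist[func] = []
--     for rob in robots:
--       if not first:
--         alphabet += ","
--       first = False
--       event = rob + func + buf
--       alphabet += event
--       eventlist[func].append(event)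
--   string += "alphabet = " + alphabet + "\n"
--   string += "controllable = " + alphabet + "\n"
--   string += "observable = " + alphabet + "\n"
--   transitions = ""
--   first = True
--   for func in functions:
--     pred = None
--     succ = None
--     if "-pick-" == func:
--       pred, succ = "2", "1"
--     else:
--       pred, succ = "1", "2"
--     for event in eventlist[func]:
--       if "pick" in event and ("R" + str(index)) in event:
--         pred, succ = "3", "1"
--       elif "drop" in event and ("R" + str(index)) in event:
--         pred, succ = "1", "2"
--       elif "pick" in event and ("R" + str(index+1)) in event:
--         pred, succ = "2", "1"
--       elif "drop" in event and ("R" + str(index+1)) in event: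
--         pred, succ = "1", "3"
--       if not first:
--         transitions += ","
--       first = False
--       transitions += "("+ pred + ", " + succ + ", " + event + ", 1)"
--   string += "transitions = " + transitions + "\n"
--   string += "marker-states = 1\n"
--   string += "initial-state = 1\n"
--   return string
-- ===== SOURCE B (Python) =====
-- def make_buffer(index):
--     j = index + 1
--     e1 = f"R{index}-pick-B{index}"
--     e2 = f"R{j}-pick-B{index}"
--     e3 = f"R{index}-drop-B{index}"
--     e4 = f"R{j}-drop-B{index}"
--     alpha = f"{e1},{e2},{e3},{e4}"
--     return ("[weighted-automaton]\n"
--             "states = 1, 2, 3, 4\n"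
--             f"alphabet = {alpha}\n"
--             f"controllable = {alpha}\n"
--             f"observable = {alpha}\n"
--             f"transitions = (3, 1, {e1}, 1),(2, 1, {e2}, 1),(1, 2, {e3}, 1),(1, 3, {e4}, 1)\n"
--             "marker-states = 1\n"
--             "initial-state = 1\n")
-- ===== Notes on version B (the rewrite author's own statement) =====
-- stated objective: simpler
-- what changed: Replaces A's loops over function/robot lists, the dict of event lists and the substring-matching branch chain with a single closed-form template: the four event names and the four fixed transitions are interpolated directly into the output string.
import Mathlib
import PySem

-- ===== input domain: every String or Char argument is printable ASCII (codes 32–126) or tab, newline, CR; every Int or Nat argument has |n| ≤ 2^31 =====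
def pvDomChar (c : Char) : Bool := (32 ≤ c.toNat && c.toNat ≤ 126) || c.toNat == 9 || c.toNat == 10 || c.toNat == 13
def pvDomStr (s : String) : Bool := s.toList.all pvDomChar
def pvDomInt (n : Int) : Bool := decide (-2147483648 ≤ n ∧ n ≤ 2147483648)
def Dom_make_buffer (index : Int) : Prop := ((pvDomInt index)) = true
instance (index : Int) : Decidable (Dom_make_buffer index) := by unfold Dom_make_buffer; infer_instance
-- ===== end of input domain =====

-- B replaces A's loops, dict of event lists and substring-matching branch chain by a single closed-form string template (objective: simpler).


-- ===== PORT A =====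
def make_buffer (index : Int) : String :=
  let string := "[weighted-automaton]\n"
  let string := string ++ "states = 1, 2, 3, 4\n"
  let functions : List String := ["-pick-", "-drop-"]
  let robots : List String := ["R" ++ PySem.Int.toStr index, "R" ++ PySem.Int.toStr (index + 1)]
  let buf : String := "B" ++ PySem.Int.toStr index
  let st1 : PySem.Dict String (List String) × String × Bool :=
    functions.foldl (fun st func =>
      let st := (st.1.insert func [], st.2.1, st.2.2)
      robots.foldl (fun st rob =>
        let alphabet := if st.2.2 = false then st.2.1 ++ "," else st.2.1
        let event := rob ++ func ++ buf
        let alphabet := alphabet ++ event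
        (st.1.modify func [] (fun l => l ++ [event]), alphabet, false)) st)
      (PySem.Dict.empty, "", true)
  let eventlist := st1.1
  let alphabet := st1.2.1
  let string := string ++ "alphabet = " ++ alphabet ++ "\n"
  let string := string ++ "controllable = " ++ alphabet ++ "\n"
  let string := string ++ "observable = " ++ alphabet ++ "\n"
  let st2 : String × Bool :=
    functions.foldl (fun st func =>
      let ps0 : String × String := if ("-pick-" : String) = func then ("2", "1") else ("1", "2")
      let inner :=
        (eventlist.getD func []).foldl (fun st2 event =>
          let ps :=
            if PySem.Str.isIn "pick" event && PySem.Str.isIn ("R" ++ PySem.Int.toStr index) event then ("3", "1")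
            else if PySem.Str.isIn "drop" event && PySem.Str.isIn ("R" ++ PySem.Int.toStr index) event then ("1", "2")
            else if PySem.Str.isIn "pick" event && PySem.Str.isIn ("R" ++ PySem.Int.toStr (index + 1)) event then ("2", "1")
            else if PySem.Str.isIn "drop" event && PySem.Str.isIn ("R" ++ PySem.Int.toStr (index + 1)) event then ("1", "3")
            else st2.1
          let transitions := if st2.2.2 = false then st2.2.1 ++ "," else st2.2.1
          let transitions := transitions ++ "(" ++ ps.1 ++ ", " ++ ps.2 ++ ", " ++ event ++ ", 1)"
          (ps, transitions, false)) ((ps0.1, ps0.2), st.1, st.2)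
      (inner.2.1, inner.2.2)) ("", true)
  let string := string ++ "transitions = " ++ st2.1 ++ "\n"
  let string := string ++ "marker-states = 1\n"
  let string := string ++ "initial-state = 1\n"
  string

-- ===== PORT B =====
def make_buffer_alt (index : Int) : String :=
  let j := index + 1
  let e1 := "R" ++ PySem.Int.toStr index ++ "-pick-B" ++ PySem.Int.toStr index
  let e2 := "R" ++ PySem.Int.toStr j ++ "-pick-B" ++ PySem.Int.toStr index
  let e3 := "R" ++ PySem.Int.toStr index ++ "-drop-B" ++ PySem.Int.toStr index
  let e4 := "R" ++ PySem.Int.toStr j ++ "-drop-B" ++ PySem.Int.toStr index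
  let alpha := e1 ++ "," ++ e2 ++ "," ++ e3 ++ "," ++ e4
  "[weighted-automaton]\nstates = 1, 2, 3, 4\n" ++
    "alphabet = " ++ alpha ++ "\n" ++
    "controllable = " ++ alpha ++ "\n" ++
    "observable = " ++ alpha ++ "\n" ++
    "transitions = (3, 1, " ++ e1 ++ ", 1),(2, 1, " ++ e2 ++ ", 1),(1, 2, " ++ e3 ++ ", 1),(1, 3, " ++ e4 ++ ", 1)\n" ++
    "marker-states = 1\ninitial-state = 1\n"

-- ===== PRECONDITION & SPEC =====
def Spec_make_buffer (index : Int) (out : String) : Prop := out = make_buffer_alt index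
instance (index : Int) (out : String) : Decidable (Spec_make_buffer index out) := by unfold Spec_make_buffer; infer_instance

-- ===== CLAIM (what is proved, stated in full; the proofs are below) =====
def Claim_equal_make_buffer : Prop := ∀ (index : Int), Dom_make_buffer index → Spec_make_buffer index (make_buffer index)

-- ===== LEMMAS AND PROOFS =====

def pvIsDig (c : Char) : Prop := 48 ≤ c.toNat ∧ c.toNat ≤ 57

def pvVal (l : List Char) : Nat := l.foldl (fun a c => 10 * a + (c.toNat - 48)) 0

theorem pv_toDigitsCore_shift (f : Nat) : ∀ (n : Nat) (ds : List Char),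
    Nat.toDigitsCore 10 f n ds = Nat.toDigitsCore 10 f n [] ++ ds := by
  induction f with
  | zero => intro n ds; simp [Nat.toDigitsCore]
  | succ f ih =>
    intro n ds
    simp only [Nat.toDigitsCore]
    by_cases h : n / 10 = 0
    · simp [h]
    · simp only [h]
      rw [ih (n/10) (Nat.digitChar (n % 10) :: ds), ih (n/10) [Nat.digitChar (n % 10)]]
      simp
theorem pv_toDigitsCore_fuel (f : Nat) : ∀ (f' n : Nat) (ds : List Char), n < f → n < f' →
    Nat.toDigitsCore 10 f n ds = Nat.toDigitsCore 10 f' n ds := by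
  induction f with
  | zero => intro f' n ds h; omega
  | succ f ih =>
    intro f' n ds h h'
    cases f' with
    | zero => omega
    | succ f' =>
      simp only [Nat.toDigitsCore]
      by_cases h0 : n / 10 = 0
      · simp [h0]
      · simp only [h0]
        exact ih f' (n/10) _ (by omega) (by omega)

theorem pv_toDigits_lt (n : Nat) (h : n < 10) : Nat.toDigits 10 n = [Nat.digitChar n] := by
  simp [Nat.toDigits, Nat.toDigitsCore, Nat.div_eq_of_lt h, Nat.mod_eq_of_lt h]

theorem pv_toDigits_ge (n : Nat) (h : 10 ≤ n) :
    Nat.toDigits 10 n = Nat.toDigits 10 (n / 10) ++ [Nat.digitChar (n % 10)] := by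
  have h0 : ¬ n / 10 = 0 := by omega
  show Nat.toDigitsCore 10 (n+1) n [] = _
  rw [Nat.toDigitsCore]
  rw [if_neg h0]
  rw [pv_toDigitsCore_shift]
  congr 1
  exact pv_toDigitsCore_fuel n (n/10+1) (n/10) [] (by omega) (by omega)

theorem pv_digitChar_dig (n : Nat) (h : n < 10) : pvIsDig (Nat.digitChar n) := by
  interval_cases n <;> exact ⟨by decide, by decide⟩

theorem pv_toDigits_dig (n : Nat) : ∀ c ∈ Nat.toDigits 10 n, pvIsDig c := by
  induction n using Nat.strong_induction_on with
  | _ n ih =>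
    by_cases h : n < 10
    · rw [pv_toDigits_lt n h]
      intro c hc; simp at hc; subst hc; exact pv_digitChar_dig n h
    · rw [pv_toDigits_ge n (by omega)]
      intro c hc
      rcases List.mem_append.mp hc with h1 | h2
      · exact ih (n/10) (by omega) c h1
      · simp at h2; subst h2; exact pv_digitChar_dig _ (Nat.mod_lt _ (by omega))

theorem pv_toDigits_ne_nil (n : Nat) : Nat.toDigits 10 n ≠ [] := by
  by_cases h : n < 10
  · rw [pv_toDigits_lt n h]; simp
  · rw [pv_toDigits_ge n (by omega)]; simp

theorem pv_val_toDigits (n : Nat) : pvVal (Nat.toDigits 10 n) = n := by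
  induction n using Nat.strong_induction_on with
  | _ n ih =>
    by_cases h : n < 10
    · rw [pv_toDigits_lt n h]
      unfold pvVal
      interval_cases n <;> decide
    · rw [pv_toDigits_ge n (by omega)]
      unfold pvVal
      rw [List.foldl_append]
      have := ih (n/10) (by omega)
      unfold pvVal at this
      rw [this]
      simp only [List.foldl]
      have hd := pv_digitChar_dig (n % 10) (Nat.mod_lt _ (by omega))
      have : (Nat.digitChar (n % 10)).toNat - 48 = n % 10 := by
        have h10 : n % 10 < 10 := Nat.mod_lt _ (by omega)
        generalize hm : n % 10 = m at *
        interval_cases m <;> decide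
      rw [this]
      omega

theorem pv_foldl_ge (r : List Char) : ∀ a : Nat,
    10 ^ r.length * a ≤ r.foldl (fun a c => 10 * a + (c.toNat - 48)) a := by
  induction r with
  | nil => intro a; simp
  | cons c r ih =>
    intro a
    simp only [List.foldl, List.length_cons]
    calc 10 ^ (r.length + 1) * a = 10 ^ r.length * (10 * a) := by ring
    _ ≤ 10 ^ r.length * (10 * a + (c.toNat - 48)) := Nat.mul_le_mul_left _ (by omega)
    _ ≤ r.foldl (fun a c => 10 * a + (c.toNat - 48)) (10 * a + (c.toNat - 48)) := ih _

theorem pv_toDigits_inj (a b : Nat) (h : Nat.toDigits 10 a = Nat.toDigits 10 b) : a = b := by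
  have := pv_val_toDigits a
  rw [h, pv_val_toDigits] at this
  omega

theorem pv_toDigits_prefix_le (a b : Nat) (hne : a ≠ b)
    (h : Nat.toDigits 10 a <+: Nat.toDigits 10 b) : 10 * a ≤ b := by
  obtain ⟨r, hr⟩ := h
  cases r with
  | nil => simp at hr; exact absurd (pv_toDigits_inj a b hr) hne
  | cons c r' =>
    have hb := pv_val_toDigits b
    rw [← hr] at hb
    unfold pvVal at hb
    rw [List.foldl_append] at hb
    have hva : (Nat.toDigits 10 a).foldl (fun a c => 10 * a + (c.toNat - 48)) 0 = a := pv_val_toDigits a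
    rw [hva] at hb
    have := pv_foldl_ge (c :: r') a
    have hp : 10 ≤ 10 ^ (c :: r').length := by
      have : 1 ≤ (c :: r').length := by simp
      calc (10:Nat) = 10 ^ 1 := by norm_num
      _ ≤ 10 ^ (c :: r').length := Nat.pow_le_pow_right (by norm_num) this
    nlinarith [hb, this, hp]

theorem pv_toChars_nonneg (n : Int) (h : 0 ≤ n) :
    PySem.Int.toChars n = Nat.toDigits 10 n.toNat := by
  simp [PySem.Int.toChars, not_lt.mpr h]

theorem pv_toChars_neg (n : Int) (h : n < 0) :
    PySem.Int.toChars n = '-' :: Nat.toDigits 10 n.natAbs := by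
  simp [PySem.Int.toChars, h]

theorem pv_toChars_ne_nil (n : Int) : PySem.Int.toChars n ≠ [] := by
  by_cases h : 0 ≤ n
  · rw [pv_toChars_nonneg n h]; exact pv_toDigits_ne_nil _
  · rw [pv_toChars_neg n (by omega)]; simp

theorem pv_toChars_mem (n : Int) : ∀ c ∈ PySem.Int.toChars n, pvIsDig c ∨ c = '-' := by
  by_cases h : 0 ≤ n
  · rw [pv_toChars_nonneg n h]
    intro c hc; exact Or.inl (pv_toDigits_dig _ c hc)
  · rw [pv_toChars_neg n (by omega)]
    intro c hc
    rcases List.mem_cons.mp hc with h1 | h2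
    · exact Or.inr h1
    · exact Or.inl (pv_toDigits_dig _ c h2)

theorem pv_toChars_tail (n : Int) : ∀ c ∈ (PySem.Int.toChars n).tail, pvIsDig c := by
  by_cases h : 0 ≤ n
  · rw [pv_toChars_nonneg n h]
    intro c hc; exact pv_toDigits_dig _ c (List.mem_of_mem_tail hc)
  · rw [pv_toChars_neg n (by omega)]
    intro c hc; exact pv_toDigits_dig _ c hc

-- str(n) is never a prefix of str(n+1)
theorem pv_not_prefix_succ (n : Int) :
    ¬ (PySem.Int.toChars n <+: PySem.Int.toChars (n + 1)) := by
  intro hp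
  by_cases h1 : 1 ≤ n
  · rw [pv_toChars_nonneg n (by omega), pv_toChars_nonneg (n+1) (by omega)] at hp
    have hne : n.toNat ≠ (n+1).toNat := by omega
    have := pv_toDigits_prefix_le _ _ hne hp
    omega
  · by_cases h0 : n = 0
    · subst h0; revert hp; decide
    · by_cases hm1 : n = -1
      · subst hm1
        norm_num at hp
        have := hp.length_le
        revert this; decide
      · have hn : n < -1 := by omega
        rw [pv_toChars_neg n (by omega), pv_toChars_neg (n+1) (by omega)] at hp
        rw [List.cons_prefix_cons] at hp
        have hne : n.natAbs ≠ (n+1).natAbs := by omega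
        have := pv_toDigits_prefix_le _ _ hne hp.2
        omega

theorem pv_not_infix_R (s t mid : List Char)
    (hRt : 'R' ∉ t) (hRm : 'R' ∉ mid) (hRs : 'R' ∉ s)
    (ht : t ≠ []) (hmid : ∃ m', mid = '-' :: m')
    (hpre : ¬ s <+: t) (hstail : ∀ c ∈ s.tail, pvIsDig c) :
    ¬ (('R' :: s) <:+: ('R' :: (t ++ mid ++ 'B' :: s))) := by
  rintro ⟨l, r, hl⟩
  cases l with
  | cons c l' =>
    simp only [List.cons_append, List.cons.injEq] at hl
    obtain ⟨hc, h2⟩ := hl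
    have hmem : 'R' ∈ t ++ mid ++ 'B' :: s := by
      rw [← h2]; simp
    simp only [List.mem_append, List.mem_cons] at hmem
    rcases hmem with (h | h) | (h | h)
    · exact hRt h
    · exact hRm h
    · exact absurd h (by decide)
    · exact hRs h
  | nil =>
    simp only [List.nil_append, List.cons_append, List.cons.injEq, true_and] at hl
    -- hl : s ++ r = t ++ mid ++ 'B' :: s
    have hp : s <+: t ++ (mid ++ 'B' :: s) := ⟨r, by rw [hl]; simp [List.append_assoc]⟩
    by_cases hlen : s.length ≤ t.length
    · exact hpre (List.prefix_of_prefix_length_le hp (List.prefix_append t _) hlen)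
    · have htp : t <+: s :=
        List.prefix_of_prefix_length_le (List.prefix_append t _) hp (by omega)
      obtain ⟨w, hw⟩ := htp
      have hwr : w ++ r = mid ++ 'B' :: s := by
        have : t ++ (w ++ r) = t ++ (mid ++ 'B' :: s) := by
          rw [← List.append_assoc, hw, hl]; simp [List.append_assoc]
        exact List.append_cancel_left this
      obtain ⟨m', hm'⟩ := hmid
      cases w with
      | nil => simp at hw; subst hw; exact hlen le_rfl
      | cons d w'' =>
        have hd : d = '-' := by
          rw [hm'] at hwr
          simpa using congrArg (fun l => l.head?) hwr
        obtain ⟨c0, t', ht'⟩ : ∃ c0 t', t = c0 :: t' := by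
          cases t with
          | nil => exact absurd rfl ht
          | cons a b => exact ⟨a, b, rfl⟩
        have hmemtail : '-' ∈ s.tail := by
          rw [← hw, ht', hd]
          simp
        exact absurd (hstail '-' hmemtail) (by unfold pvIsDig; decide)

theorem pv_R_notin (n : Int) : 'R' ∉ PySem.Int.toChars n := by
  intro h
  rcases pv_toChars_mem n _ h with h | h
  · exact absurd h (by unfold pvIsDig; decide)
  · exact absurd h (by decide)

theorem pv_k_notin (n : Int) : 'k' ∉ PySem.Int.toChars n := by
  intro h
  rcases pv_toChars_mem n _ h with h | h
  · exact absurd h (by unfold pvIsDig; decide)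
  · exact absurd h (by decide)

theorem pv_e1_pick (n m : Int) :
    PySem.Str.isIn "pick" ("R" ++ PySem.Int.toStr n ++ "-pick-" ++ ("B" ++ PySem.Int.toStr m)) = true := by
  simp only [PySem.Str.isIn_eq, String.toList_append, PySem.Int.toList_toStr]
  rw [show ("pick":String).toList = ['p','i','c','k'] from rfl,
     show ("R":String).toList = ['R'] from rfl,
     show ("-pick-":String).toList = ['-','p','i','c','k','-'] from rfl,
     show ("B":String).toList = ['B'] from rfl]
  rw [PySem.Chars.isIn_iff_infix]
  exact ⟨['R'] ++ PySem.Int.toChars n ++ ['-'], ['-'] ++ (['B'] ++ PySem.Int.toChars m), by simp⟩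

theorem pv_drop_pos (n m : Int) :
    PySem.Str.isIn "drop" ("R" ++ PySem.Int.toStr n ++ "-drop-" ++ ("B" ++ PySem.Int.toStr m)) = true := by
  simp only [PySem.Str.isIn_eq, String.toList_append, PySem.Int.toList_toStr]
  rw [show ("drop":String).toList = ['d','r','o','p'] from rfl,
     show ("R":String).toList = ['R'] from rfl,
     show ("-drop-":String).toList = ['-','d','r','o','p','-'] from rfl,
     show ("B":String).toList = ['B'] from rfl]
  rw [PySem.Chars.isIn_iff_infix]
  exact ⟨['R'] ++ PySem.Int.toChars n ++ ['-'], ['-'] ++ (['B'] ++ PySem.Int.toChars m), by simp⟩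

theorem pv_pick_neg (n m : Int) :
    PySem.Str.isIn "pick" ("R" ++ PySem.Int.toStr n ++ "-drop-" ++ ("B" ++ PySem.Int.toStr m)) = false := by
  simp only [PySem.Str.isIn_eq, String.toList_append, PySem.Int.toList_toStr]
  rw [show ("pick":String).toList = ['p','i','c','k'] from rfl,
     show ("R":String).toList = ['R'] from rfl,
     show ("-drop-":String).toList = ['-','d','r','o','p','-'] from rfl,
     show ("B":String).toList = ['B'] from rfl]
  rw [PySem.Chars.isIn_eq_false_iff]
  intro h
  have hk : 'k' ∈ ['R'] ++ PySem.Int.toChars n ++ ['-','d','r','o','p','-'] ++ (['B'] ++ PySem.Int.toChars m) :=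
    h.subset (by decide)
  simp only [List.mem_append, List.mem_cons] at hk
  rcases hk with ((h1 | h2) | h3) | (h4 | h5)
  · exact absurd h1 (by decide)
  · exact pv_k_notin n h2
  · exact absurd h3 (by decide)
  · exact absurd h4 (by decide)
  · exact pv_k_notin m h5

theorem pv_R_prefix (n m : Int) (f : String) :
    PySem.Str.isIn ("R" ++ PySem.Int.toStr n) ("R" ++ PySem.Int.toStr n ++ f ++ ("B" ++ PySem.Int.toStr m)) = true := by
  simp only [PySem.Str.isIn_eq, String.toList_append, PySem.Int.toList_toStr]
  rw [PySem.Chars.isIn_iff_infix]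
  exact ⟨[], f.toList ++ (("B":String).toList ++ PySem.Int.toChars m), by simp⟩

theorem pv_R_neg_pick (n : Int) :
    PySem.Str.isIn ("R" ++ PySem.Int.toStr n) ("R" ++ PySem.Int.toStr (n+1) ++ "-pick-" ++ ("B" ++ PySem.Int.toStr n)) = false := by
  simp only [PySem.Str.isIn_eq, String.toList_append, PySem.Int.toList_toStr]
  rw [show ("R":String).toList = ['R'] from rfl,
     show ("-pick-":String).toList = ['-','p','i','c','k','-'] from rfl,
     show ("B":String).toList = ['B'] from rfl]
  rw [PySem.Chars.isIn_eq_false_iff]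
  have := pv_not_infix_R (PySem.Int.toChars n) (PySem.Int.toChars (n+1)) ['-','p','i','c','k','-']
    (pv_R_notin (n+1)) (by decide) (pv_R_notin n) (pv_toChars_ne_nil (n+1)) ⟨_, rfl⟩
    (pv_not_prefix_succ n) (pv_toChars_tail n)
  simpa using this

theorem pv_R_neg_drop (n : Int) :
    PySem.Str.isIn ("R" ++ PySem.Int.toStr n) ("R" ++ PySem.Int.toStr (n+1) ++ "-drop-" ++ ("B" ++ PySem.Int.toStr n)) = false := by
  simp only [PySem.Str.isIn_eq, String.toList_append, PySem.Int.toList_toStr]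
  rw [show ("R":String).toList = ['R'] from rfl,
     show ("-drop-":String).toList = ['-','d','r','o','p','-'] from rfl,
     show ("B":String).toList = ['B'] from rfl]
  rw [PySem.Chars.isIn_eq_false_iff]
  have := pv_not_infix_R (PySem.Int.toChars n) (PySem.Int.toChars (n+1)) ['-','d','r','o','p','-']
    (pv_R_notin (n+1)) (by decide) (pv_R_notin n) (pv_toChars_ne_nil (n+1)) ⟨_, rfl⟩
    (pv_not_prefix_succ n) (pv_toChars_tail n)
  simpa using this

-- ===== VERDICT (by name: the statement is the Claim_ definition above) =====
set_option maxHeartbeats 2000000 in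
set_option maxRecDepth 100000 in
theorem make_buffer_spec : Claim_equal_make_buffer := by
  intro index _
  unfold Spec_make_buffer
  simp only [make_buffer, make_buffer_alt, List.foldl_cons, List.foldl_nil]
  simp only [pysem, PySem.Dict.modify, List.foldl_cons, List.foldl_nil, String.reduceEq,
    if_true, if_false, Bool.true_eq_false, List.nil_append, List.singleton_append]
  simp only [← PySem.Str.isIn_eq]
  simp only [pv_e1_pick index index, pv_e1_pick (index+1) index,
    pv_drop_pos index index, pv_drop_pos (index+1) index,
    pv_pick_neg index index, pv_pick_neg (index+1) index,
    pv_R_prefix index index, pv_R_prefix (index+1) index,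
    pv_R_neg_pick index, pv_R_neg_drop index]
  simp only [Bool.and_self, Bool.and_false, Bool.false_and, Bool.and_true, Bool.true_and,
    if_true]
  rw [← String.toList_inj]
  simp [String.toList_append, List.append_assoc]
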